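-- pv_equiv track=rewrite | github.com/JeriH26/Python_JAVA_Business_Simulation | training/python/variant_bank/solutions/v008_max_area_after_one_swap.py | solve
-- ===== SOURCE A (Python) =====
-- def _container_area(height):
--     best = 0
--     left, right = 0, len(height) - 1
--     while left < right:
--         best = max(best, min(height[left], height[right]) * (right - left))
--         if height[left] <= height[right]:
--             left += 1
--         else:
--             right -= 1
--     return best
--
-- def solve(height):
--     best = _container_area(height)
--     nums = height[:]
--     for i in range(len(nums)):
--         for j in range(i + 1, len(nums)):
--             nums[i], nums[j] = nums[j], nums[i]
--             best = max(best, _container_area(nums))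
--             nums[i], nums[j] = nums[j], nums[i]
--     return best
-- ===== SOURCE B (Python) =====
-- def solve(height):
--     n = len(height)
--
--     def argmax_excl(excl):
--         best = None
--         for k in range(n):
--             if k not in excl and (best is None or height[k] > height[best]):
--                 best = k
--         return best
--
--     k1 = argmax_excl(())
--     k2 = argmax_excl((k1,))
--     k3 = argmax_excl((k1, k2))
--     best = 0
--     for i in range(n):
--         for j in range(i + 1, n):
--             m = k1 if k1 not in (i, j) else (k2 if k2 not in (i, j) else k3)
--             cand = min(height[i], height[j])
--             if m is not None:
--                 cand = max(cand, min(max(height[i], height[j]), height[m]))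
--             best = max(best, cand * (j - i))
--     return best
-- ===== Notes on version B (the rewrite author's own statement) =====
-- stated objective: faster
-- what changed: Instead of re-running the two-pointer container scan for every one of the O(n^2) swaps, B maximises per wall pair (i,j) the achievable min-height directly: min(h[i],h[j]) or, via the best single swap, min(max(h[i],h[j]), M) where M is the tallest wall outside {i,j}, read off from three precomputed argmaxes.
import Mathlib
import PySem

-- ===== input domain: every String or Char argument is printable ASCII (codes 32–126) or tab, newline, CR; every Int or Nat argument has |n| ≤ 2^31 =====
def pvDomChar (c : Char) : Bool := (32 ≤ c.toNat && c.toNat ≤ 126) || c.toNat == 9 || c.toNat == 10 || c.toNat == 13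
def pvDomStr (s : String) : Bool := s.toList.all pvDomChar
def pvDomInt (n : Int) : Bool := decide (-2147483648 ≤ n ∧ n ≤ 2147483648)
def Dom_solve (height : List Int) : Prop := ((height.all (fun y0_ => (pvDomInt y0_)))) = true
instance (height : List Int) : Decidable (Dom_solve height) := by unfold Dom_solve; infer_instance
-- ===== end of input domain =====

-- B replaces A's per-swap two-pointer rescan (O(n^3)) by a per-wall-pair closed form for the
-- best min-height reachable with one swap, using three precomputed argmax indices (O(n^2)).

-- ===== PORT A =====
-- `_container_area`'s while loop; `left`/`right` are always in range when read, so `getD` is exact.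
def areaLoop (h : List Int) (left right : Nat) (best : Int) : Int :=
  if left < right then
    let b := max best (min (h.getD left 0) (h.getD right 0) * ((right : Int) - (left : Int)))
    if h.getD left 0 ≤ h.getD right 0 then areaLoop h (left + 1) right b
    else areaLoop h left (right - 1) b
  else best
  termination_by right - left
  decreasing_by all_goals omega

-- Python's `right = len(height)-1` is -1 on [], where the loop never runs; Nat `0` gives the same 0.
def containerArea (h : List Int) : Int := areaLoop h 0 (h.length - 1) 0

-- the net effect of A's swap / recompute / swap-back on the scanned list
def pySwap (h : List Int) (i j : Nat) : List Int := (h.set i (h.getD j 0)).set j (h.getD i 0)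

def solve (height : List Int) : Int :=
  let n := height.length
  (List.range n).foldl (fun best i =>
    (List.range' (i + 1) (n - (i + 1))).foldl (fun b j =>
      max b (containerArea (pySwap height i j))) best) (containerArea height)

-- ===== PORT B =====
-- Source B's `argmax_excl`: first index of the maximum height outside `excl`, None if none.
def argmaxExcl (h : List Int) (n : Nat) (excl : List (Option Nat)) : Option Nat :=
  (List.range n).foldl (fun best k =>
    if some k ∈ excl then best
    else match best with
      | none => some k
      | some b => if h.getD b 0 < h.getD k 0 then some k else best) none

def solve_alt (height : List Int) : Int :=
  let n := height.length
  let k1 := argmaxExcl height n []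
  let k2 := argmaxExcl height n [k1]
  let k3 := argmaxExcl height n [k1, k2]
  (List.range n).foldl (fun best i =>
    (List.range' (i + 1) (n - (i + 1))).foldl (fun b j =>
      let m := if k1 ≠ some i ∧ k1 ≠ some j then k1
               else if k2 ≠ some i ∧ k2 ≠ some j then k2 else k3
      let cand := min (height.getD i 0) (height.getD j 0)
      let cand := match m with
        | none => cand
        | some mm => max cand (min (max (height.getD i 0) (height.getD j 0)) (height.getD mm 0))
      max b (cand * ((j : Int) - (i : Int)))) best) 0

-- ===== PRECONDITION & SPEC =====
def Spec_solve (height : List Int) (out : Int) : Prop := out = solve_alt height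
instance (height : List Int) (out : Int) : Decidable (Spec_solve height out) := by unfold Spec_solve; infer_instance

-- ===== CLAIM (what is proved, stated in full; the proofs are below) =====
def Claim_equal_solve : Prop := ∀ (height : List Int), Dom_solve height → Spec_solve height (solve height)

-- ===== LEMMAS AND PROOFS =====

-- max-fold infrastructure
def mf (b : Int) (xs : List Int) : Int := xs.foldl max b

theorem le_mf (xs : List Int) (b : Int) : b ≤ mf b xs := by
  induction xs generalizing b with
  | nil => simp [mf]
  | cons x t ih => exact le_trans (le_max_left b x) (ih (max b x))

theorem mem_le_mf {x : Int} {xs : List Int} (b : Int) (hx : x ∈ xs) : x ≤ mf b xs := by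
  induction xs generalizing b with
  | nil => cases hx
  | cons y t ih =>
    rcases List.mem_cons.1 hx with rfl | h
    · exact le_trans (le_max_right b x) (le_mf t (max b x))
    · exact ih (max b y) h

theorem mf_le {xs : List Int} {b c : Int} (hb : b ≤ c) (hx : ∀ x ∈ xs, x ≤ c) : mf b xs ≤ c := by
  induction xs generalizing b with
  | nil => simpa [mf] using hb
  | cons y t ih =>
    exact ih (max_le hb (hx y (List.mem_cons_self ..))) (fun x hxm => hx x (List.mem_cons_of_mem _ hxm))

theorem mf_map_congr {α : Type} {xs ys : List α} (f : α → Int) (b : Int)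
    (h : ∀ p, p ∈ xs ↔ p ∈ ys) : mf b (xs.map f) = mf b (ys.map f) := by
  apply le_antisymm
  · refine mf_le (le_mf _ b) ?_
    intro x hx
    rcases List.mem_map.1 hx with ⟨p, hp, rfl⟩
    exact mem_le_mf b (List.mem_map.2 ⟨p, (h p).1 hp, rfl⟩)
  · refine mf_le (le_mf _ b) ?_
    intro x hx
    rcases List.mem_map.1 hx with ⟨p, hp, rfl⟩
    exact mem_le_mf b (List.mem_map.2 ⟨p, (h p).2 hp, rfl⟩)

-- all pairs i < j < n, the order both double loops enumerate
def pairList (n : Nat) : List (Nat × Nat) :=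
  (List.range n).flatMap (fun i => (List.range' (i + 1) (n - (i + 1))).map (fun j => (i, j)))

theorem mem_pairList {n : Nat} {p : Nat × Nat} : p ∈ pairList n ↔ p.1 < p.2 ∧ p.2 < n := by
  cases p with
  | mk i j =>
    simp only [pairList, List.mem_flatMap, List.mem_range, List.mem_map, List.mem_range'_1]
    constructor
    · rintro ⟨a, ha, b, hb, h⟩
      obtain ⟨rfl, rfl⟩ : a = i ∧ b = j := by
        exact ⟨congrArg Prod.fst h, congrArg Prod.snd h⟩
      omega
    · rintro ⟨h1, h2⟩
      exact ⟨i, by omega, j, by omega, rfl⟩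

-- the double loop over pairs is a max-fold over pairList
theorem nested_foldl (f : Nat → Nat → Int) (n : Nat) (init : Int) :
    (List.range n).foldl (fun best i =>
      (List.range' (i + 1) (n - (i + 1))).foldl (fun b j => max b (f i j)) best) init
    = mf init ((pairList n).map (fun p => f p.1 p.2)) := by
  have gen : ∀ (outer : List Nat) (init : Int),
      outer.foldl (fun best i =>
        (List.range' (i + 1) (n - (i + 1))).foldl (fun b j => max b (f i j)) best) init
      = mf init ((outer.flatMap (fun i => (List.range' (i + 1) (n - (i + 1))).map (fun j => (i, j)))).map (fun p => f p.1 p.2)) := by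
    intro outer
    induction outer with
    | nil => intro init; simp [mf]
    | cons a t ih =>
      intro init
      simp only [List.foldl_cons, List.flatMap_cons, List.map_append, List.map_map]
      rw [ih]
      simp [mf, List.foldl_append, List.foldl_map, Function.comp]
  exact gen (List.range n) init

-- pair area
def ar (h : List Int) (p : Nat × Nat) : Int :=
  min (h.getD p.1 0) (h.getD p.2 0) * ((p.2 : Int) - (p.1 : Int))

-- pairs inside the two-pointer window
def pairsIn (n l r : Nat) : List (Nat × Nat) :=
  (pairList n).filter (fun p => l ≤ p.1 ∧ p.2 ≤ r)

theorem mem_pairsIn {n l r : Nat} {p : Nat × Nat} :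
    p ∈ pairsIn n l r ↔ p.1 < p.2 ∧ p.2 < n ∧ l ≤ p.1 ∧ p.2 ≤ r := by
  simp [pairsIn, List.mem_filter, mem_pairList]; tauto

-- arithmetic core of the two-pointer argument
theorem key_le (m y b w1 w2 : Int) (hb : 0 ≤ b) (hm : m ≤ y) (h1 : 0 < w1) (h2 : w1 ≤ w2) :
    m * w1 ≤ max b (y * w2) := by
  rcases le_total m 0 with h | h
  · exact le_trans (le_trans (mul_nonpos_of_nonpos_of_nonneg h (by omega)) hb) (le_max_left _ _)
  · have : m * w1 ≤ y * w2 :=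
      le_trans (mul_le_mul_of_nonneg_left h2 h) (mul_le_mul_of_nonneg_right hm (by omega))
    exact le_trans this (le_max_right _ _)

theorem areaLoop_eq (h : List Int) :
    ∀ (d l r : Nat) (best : Int), r - l = d → 0 ≤ best → r < h.length →
      areaLoop h l r best = mf best ((pairsIn h.length l r).map (ar h)) := by
  intro d
  induction d with
  | zero =>
    intro l r best hd hb hr
    rw [areaLoop]
    simp only [if_neg (show ¬ l < r by omega)]
    refine le_antisymm (le_mf _ _) (mf_le le_rfl ?_)
    intro x hx
    rcases List.mem_map.1 hx with ⟨p, hp, rfl⟩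
    rcases mem_pairsIn.1 hp with ⟨h1, _, h3, h4⟩
    omega
  | succ d ih =>
    intro l r best hd hb hr
    rw [areaLoop]
    have hlr : l < r := by omega
    simp only [if_pos hlr]
    have hmem_lr : ar h (l, r) ∈ (pairsIn h.length l r).map (ar h) :=
      List.mem_map.2 ⟨(l, r), mem_pairsIn.2 (by exact ⟨hlr, hr, le_refl l, le_refl r⟩), rfl⟩
    by_cases hc : h.getD l 0 ≤ h.getD r 0
    · simp only [if_pos hc]
      rw [ih (l + 1) r _ (by omega) (le_trans hb (le_max_left _ _)) hr]
      apply le_antisymm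
      · refine mf_le (max_le (le_mf _ _) ?_) ?_
        · exact mem_le_mf best hmem_lr
        · intro x hx
          rcases List.mem_map.1 hx with ⟨p, hp, rfl⟩
          refine mem_le_mf best (List.mem_map.2 ⟨p, ?_, rfl⟩)
          rcases mem_pairsIn.1 hp with ⟨h1, h2, h3, h4⟩
          exact mem_pairsIn.2 ⟨h1, h2, by omega, h4⟩
      · refine mf_le (le_trans (le_max_left _ _) (le_mf _ _)) ?_
        intro x hx
        rcases List.mem_map.1 hx with ⟨p, hp, rfl⟩
        rcases mem_pairsIn.1 hp with ⟨h1, h2, h3, h4⟩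
        by_cases hp1 : l + 1 ≤ p.1
        · exact mem_le_mf _ (List.mem_map.2 ⟨p, mem_pairsIn.2 ⟨h1, h2, hp1, h4⟩, rfl⟩)
        · have hpl : p.1 = l := by omega
          have har : ar h p ≤ max best (min (h.getD l 0) (h.getD r 0) * ((r : Int) - (l : Int))) := by
            rw [min_eq_left hc]
            unfold ar
            rw [hpl]
            exact key_le _ _ _ _ _ hb
              (le_trans (min_le_left _ _) le_rfl) (by omega) (by omega)
          exact le_trans har (le_mf _ _)
    · simp only [if_neg hc]
      rw [ih l (r - 1) _ (by omega) (le_trans hb (le_max_left _ _)) (by omega)]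
      apply le_antisymm
      · refine mf_le (max_le (le_mf _ _) ?_) ?_
        · exact mem_le_mf best hmem_lr
        · intro x hx
          rcases List.mem_map.1 hx with ⟨p, hp, rfl⟩
          refine mem_le_mf best (List.mem_map.2 ⟨p, ?_, rfl⟩)
          rcases mem_pairsIn.1 hp with ⟨h1, h2, h3, h4⟩
          exact mem_pairsIn.2 ⟨h1, h2, h3, by omega⟩
      · refine mf_le (le_trans (le_max_left _ _) (le_mf _ _)) ?_
        intro x hx
        rcases List.mem_map.1 hx with ⟨p, hp, rfl⟩
        rcases mem_pairsIn.1 hp with ⟨h1, h2, h3, h4⟩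
        by_cases hp2 : p.2 ≤ r - 1
        · exact mem_le_mf _ (List.mem_map.2 ⟨p, mem_pairsIn.2 ⟨h1, h2, h3, hp2⟩, rfl⟩)
        · have hpr : p.2 = r := by omega
          have har : ar h p ≤ max best (min (h.getD l 0) (h.getD r 0) * ((r : Int) - (l : Int))) := by
            rw [min_eq_right (le_of_lt (lt_of_not_ge hc))]
            unfold ar
            rw [hpr]
            exact key_le _ _ _ _ _ hb (min_le_right _ _) (by omega) (by omega)
          exact le_trans har (le_mf _ _)

theorem containerArea_eq (h : List Int) :
    containerArea h = mf 0 ((pairList h.length).map (ar h)) := by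
  by_cases hn : h.length = 0
  · simp [containerArea, hn, areaLoop, pairList, mf]
  · unfold containerArea
    rw [areaLoop_eq h (h.length - 1 - 0) 0 (h.length - 1) 0 rfl le_rfl (by omega)]
    refine mf_map_congr (ar h) 0 (fun p => ?_)
    rw [mem_pairsIn, mem_pairList]
    omega

theorem pySwap_length (h : List Int) (i j : Nat) : (pySwap h i j).length = h.length := by
  simp [pySwap]

theorem getD_pySwap (h : List Int) (i j k : Nat) (hi : i < h.length) (hj : j < h.length)
    (hij : i ≠ j) (hk : k < h.length) :
    (pySwap h i j).getD k 0 =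
      if k = j then h.getD i 0 else if k = i then h.getD j 0 else h.getD k 0 := by
  simp only [pySwap, List.getD_eq_getElem?_getD, List.getElem?_set, List.length_set]
  by_cases h1 : k = j <;> by_cases h2 : k = i <;>
    simp [h1, h2, hij, hi, hj, hk, Ne.symm]

theorem argmaxExcl_succ (h : List Int) (n : Nat) (excl : List (Option Nat)) :
    argmaxExcl h (n + 1) excl =
      (if some n ∈ excl then argmaxExcl h n excl
       else match argmaxExcl h n excl with
         | none => some n
         | some b => if h.getD b 0 < h.getD n 0 then some n else argmaxExcl h n excl) := by
  simp [argmaxExcl, List.range_succ]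

theorem argmaxExcl_spec (h : List Int) (n : Nat) (excl : List (Option Nat)) :
    (∀ b, argmaxExcl h n excl = some b →
        b < n ∧ some b ∉ excl ∧ ∀ k, k < n → some k ∉ excl → h.getD k 0 ≤ h.getD b 0)
    ∧ (argmaxExcl h n excl = none → ∀ k, k < n → some k ∈ excl) := by
  induction n with
  | zero => exact ⟨by intro b hb; simp [argmaxExcl] at hb, by intro _ k hk; omega⟩
  | succ n ih =>
    rw [argmaxExcl_succ]
    by_cases hmem : some n ∈ excl
    · simp only [if_pos hmem]
      refine ⟨?_, ?_⟩
      · intro b hb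
        obtain ⟨h1, h2, h3⟩ := ih.1 b hb
        refine ⟨by omega, h2, ?_⟩
        intro k hk hke
        rcases Nat.lt_or_ge k n with hkn | hkn
        · exact h3 k hkn hke
        · have hkn' : k = n := by omega
          subst hkn'
          exact absurd hmem hke
      · intro hnone k hk
        rcases Nat.lt_or_ge k n with hkn | hkn
        · exact ih.2 hnone k hkn
        · have : k = n := by omega
          rw [this]; exact hmem
    · simp only [if_neg hmem]
      rcases hprev : argmaxExcl h n excl with _ | b0
      · refine ⟨?_, by intro hc; cases hc⟩
        intro b hb
        cases hb
        refine ⟨by omega, hmem, ?_⟩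
        intro k hk hke
        rcases Nat.lt_or_ge k n with hkn | hkn
        · exact absurd (ih.2 hprev k hkn) hke
        · have : k = n := by omega
          rw [this]
      · obtain ⟨hb1, hb2, hb3⟩ := ih.1 b0 hprev
        by_cases hlt : h.getD b0 0 < h.getD n 0
        · simp only [if_pos hlt]
          refine ⟨?_, by intro hc; cases hc⟩
          intro b hb
          cases hb
          refine ⟨by omega, hmem, ?_⟩
          intro k hk hke
          rcases Nat.lt_or_ge k n with hkn | hkn
          · exact le_trans (hb3 k hkn hke) (le_of_lt hlt)
          · have : k = n := by omega
            rw [this]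
        · simp only [if_neg hlt]
          refine ⟨?_, by intro hc; cases hc⟩
          intro b hb
          cases hb
          refine ⟨by omega, hb2, ?_⟩
          intro k hk hke
          rcases Nat.lt_or_ge k n with hkn | hkn
          · exact hb3 k hkn hke
          · have : k = n := by omega
            rw [this]; omega

-- the candidate value B assigns to the wall pair p
def candF (h : List Int) (p : Nat × Nat) : Int :=
  let n := h.length
  let k1 := argmaxExcl h n []
  let k2 := argmaxExcl h n [k1]
  let k3 := argmaxExcl h n [k1, k2]
  let m := if k1 ≠ some p.1 ∧ k1 ≠ some p.2 then k1
           else if k2 ≠ some p.1 ∧ k2 ≠ some p.2 then k2 else k3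
  let cand := min (h.getD p.1 0) (h.getD p.2 0)
  let cand := match m with
    | none => cand
    | some mm => max cand (min (max (h.getD p.1 0) (h.getD p.2 0)) (h.getD mm 0))
  cand * ((p.2 : Int) - (p.1 : Int))

theorem solve_eq (h : List Int) :
    solve h = mf (containerArea h)
      ((pairList h.length).map (fun p => containerArea (pySwap h p.1 p.2))) := by
  simp only [solve]
  rw [nested_foldl]

theorem solve_alt_eq (h : List Int) :
    solve_alt h = mf 0 ((pairList h.length).map (candF h)) := by
  simp only [solve_alt]
  rw [nested_foldl]
  rfl

-- the chosen index m of B: exists, avoids {i,j}, dominates every height outside {i,j}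
def pickM (h : List Int) (i j : Nat) : Option Nat :=
  if argmaxExcl h h.length [] ≠ some i ∧ argmaxExcl h h.length [] ≠ some j then
    argmaxExcl h h.length []
  else if argmaxExcl h h.length [argmaxExcl h h.length []] ≠ some i ∧
          argmaxExcl h h.length [argmaxExcl h h.length []] ≠ some j then
    argmaxExcl h h.length [argmaxExcl h h.length []]
  else
    argmaxExcl h h.length [argmaxExcl h h.length [], argmaxExcl h h.length [argmaxExcl h h.length []]]

theorem pickM_some (h : List Int) (i j : Nat) (hij : i ≠ j) (mm : Nat)
    (hm : pickM h i j = some mm) : mm < h.length ∧ mm ≠ i ∧ mm ≠ j := by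
  have S2 := argmaxExcl_spec h h.length [argmaxExcl h h.length []]
  have S3 := argmaxExcl_spec h h.length [argmaxExcl h h.length [], argmaxExcl h h.length [argmaxExcl h h.length []]]
  unfold pickM at hm
  split_ifs at hm with c1 c2
  · obtain ⟨hb1, _, _⟩ := (argmaxExcl_spec h h.length []).1 mm hm
    exact ⟨hb1, fun e => c1.1 (by rw [hm, e]), fun e => c1.2 (by rw [hm, e])⟩
  · obtain ⟨hb2, _, _⟩ := S2.1 mm hm
    exact ⟨hb2, fun e => c2.1 (by rw [hm, e]), fun e => c2.2 (by rw [hm, e])⟩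
  · obtain ⟨hb3, hnotin, _⟩ := S3.1 mm hm
    simp only [List.mem_cons, not_or] at hnotin
    have c1' : argmaxExcl h h.length [] = some i ∨ argmaxExcl h h.length [] = some j := by tauto
    have c2' : argmaxExcl h h.length [argmaxExcl h h.length []] = some i ∨
        argmaxExcl h h.length [argmaxExcl h h.length []] = some j := by tauto
    have hk2k1 : argmaxExcl h h.length [argmaxExcl h h.length []] ≠ argmaxExcl h h.length [] := by
      rcases c2' with e2 | e2 <;>
      · rw [e2]
        obtain ⟨_, hni, _⟩ := S2.1 _ e2
        simpa using hni
    refine ⟨hb3, ?_, ?_⟩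
    · intro e; subst e
      rcases c1' with e1 | e1
      · exact hnotin.1 e1.symm
      · rcases c2' with e2 | e2
        · exact hnotin.2.1 e2.symm
        · exact hk2k1 (e2.trans e1.symm)
    · intro e; subst e
      rcases c1' with e1 | e1
      · rcases c2' with e2 | e2
        · exact hk2k1 (e2.trans e1.symm)
        · exact hnotin.2.1 e2.symm
      · exact hnotin.1 e1.symm

theorem pickM_exists (h : List Int) (i j : Nat) (k0 : Nat)
    (hk0 : k0 < h.length) (h0i : k0 ≠ i) (h0j : k0 ≠ j) :
    ∃ mm, pickM h i j = some mm ∧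
      ∀ k, k < h.length → k ≠ i → k ≠ j → h.getD k 0 ≤ h.getD mm 0 := by
  have S1 := argmaxExcl_spec h h.length []
  have S2 := argmaxExcl_spec h h.length [argmaxExcl h h.length []]
  have S3 := argmaxExcl_spec h h.length [argmaxExcl h h.length [], argmaxExcl h h.length [argmaxExcl h h.length []]]
  unfold pickM
  split_ifs with c1 c2
  · rcases hk1 : argmaxExcl h h.length [] with _ | b1
    · exact absurd (S1.2 hk1 k0 hk0) (by simp)
    · obtain ⟨_, _, hdom⟩ := S1.1 b1 hk1
      exact ⟨b1, rfl, fun k hk _ _ => hdom k hk (by simp)⟩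
  · have c1' : argmaxExcl h h.length [] = some i ∨ argmaxExcl h h.length [] = some j := by tauto
    rcases hk2 : argmaxExcl h h.length [argmaxExcl h h.length []] with _ | b2
    · have := S2.2 hk2 k0 hk0
      simp only [List.mem_singleton] at this
      rcases c1' with e1 | e1 <;> rw [e1] at this <;> simp_all
    · obtain ⟨_, _, hdom⟩ := S2.1 b2 hk2
      refine ⟨b2, rfl, fun k hk hki hkj => hdom k hk ?_⟩
      simp only [List.mem_singleton]
      rcases c1' with e1 | e1 <;> rw [e1] <;> simp [hki, hkj]
  · have c1' : argmaxExcl h h.length [] = some i ∨ argmaxExcl h h.length [] = some j := by tauto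
    have c2' : argmaxExcl h h.length [argmaxExcl h h.length []] = some i ∨
        argmaxExcl h h.length [argmaxExcl h h.length []] = some j := by tauto
    rcases hk3 : argmaxExcl h h.length [argmaxExcl h h.length [], argmaxExcl h h.length [argmaxExcl h h.length []]] with _ | b3
    · have := S3.2 hk3 k0 hk0
      simp only [List.mem_cons] at this
      rcases this with e | e
      · rcases c1' with e1 | e1 <;> rw [e1] at e <;> simp_all
      · rcases c2' with e2 | e2 <;> rw [e2] at e <;> simp_all
    · obtain ⟨_, _, hdom⟩ := S3.1 b3 hk3
      refine ⟨b3, rfl, fun k hk hki hkj => hdom k hk ?_⟩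
      simp only [List.mem_cons, not_or]
      constructor
      · rcases c1' with e1 | e1 <;> rw [e1] <;> simp [hki, hkj]
      · rcases c2' with e2 | e2 <;> rw [e2] <;> simp [hki, hkj]

-- B's inner candidate, split off the width factor
def candV (h : List Int) (p : Nat × Nat) : Int :=
  match pickM h p.1 p.2 with
  | none => min (h.getD p.1 0) (h.getD p.2 0)
  | some mm => max (min (h.getD p.1 0) (h.getD p.2 0))
      (min (max (h.getD p.1 0) (h.getD p.2 0)) (h.getD mm 0))

theorem candF_eq (h : List Int) (p : Nat × Nat) :
    candF h p = candV h p * ((p.2 : Int) - (p.1 : Int)) := by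
  unfold candF candV pickM
  rfl

theorem base_le_candV (h : List Int) (p : Nat × Nat) :
    min (h.getD p.1 0) (h.getD p.2 0) ≤ candV h p := by
  cases hp : pickM h p.1 p.2 <;> simp [candV, hp]

theorem dom_le_candV (h : List Int) (p : Nat × Nat) (k : Nat)
    (hk : k < h.length) (hki : k ≠ p.1) (hkj : k ≠ p.2) :
    min (max (h.getD p.1 0) (h.getD p.2 0)) (h.getD k 0) ≤ candV h p := by
  obtain ⟨mm, hm, hdom⟩ := pickM_exists h p.1 p.2 k hk hki hkj
  unfold candV
  rw [hm]
  exact le_trans (min_le_min le_rfl (hdom k hk hki hkj)) (le_max_right _ _)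

theorem candV_cases (h : List Int) (p : Nat × Nat) (hij : p.1 ≠ p.2) :
    candV h p = min (h.getD p.1 0) (h.getD p.2 0) ∨
    ∃ mm, mm < h.length ∧ mm ≠ p.1 ∧ mm ≠ p.2 ∧
      candV h p = max (min (h.getD p.1 0) (h.getD p.2 0))
        (min (max (h.getD p.1 0) (h.getD p.2 0)) (h.getD mm 0)) := by
  cases hm : pickM h p.1 p.2 with
  | none => left; simp [candV, hm]
  | some mm =>
    right
    obtain ⟨h1, h2, h3⟩ := pickM_some h p.1 p.2 hij mm hm
    exact ⟨mm, h1, h2, h3, by simp [candV, hm]⟩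

theorem pySwap_comm (h : List Int) (i j : Nat) (hij : i ≠ j) :
    pySwap h i j = pySwap h j i := by
  unfold pySwap
  exact List.set_comm _ _ hij

-- after any one swap, the pair (p1,p2) has min-height at most B's candidate
theorem swap_min_le_candV (h : List Int) (i j p1 p2 : Nat) (hij : i < j) (hj : j < h.length)
    (hp : p1 < p2) (hp2 : p2 < h.length) :
    min ((pySwap h i j).getD p1 0) ((pySwap h i j).getD p2 0) ≤ candV h (p1, p2) := by
  have e1 := getD_pySwap h i j p1 (by omega) hj (by omega) (by omega)
  have e2 := getD_pySwap h i j p2 (by omega) hj (by omega) (by omega)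
  rw [e1, e2]
  have base : min (h.getD p1 0) (h.getD p2 0) ≤ candV h (p1, p2) := base_le_candV h (p1, p2)
  have dom : ∀ k, k < h.length → k ≠ p1 → k ≠ p2 →
      min (max (h.getD p1 0) (h.getD p2 0)) (h.getD k 0) ≤ candV h (p1, p2) :=
    fun k hk hki hkj => dom_le_candV h (p1, p2) k hk hki hkj
  by_cases c12 : p1 = j
  · -- p1 = j, so i < p1 < p2 and p2 ∉ {i, j}: the pair becomes (h_i, h_p2)
    rw [if_pos c12, if_neg (show p2 ≠ j by omega), if_neg (show p2 ≠ i by omega)]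
    refine le_trans ?_ (dom i (by omega) (by omega) (by omega))
    exact le_min (le_trans (min_le_right _ _) (le_max_right _ _)) (min_le_left _ _)
  · by_cases c11 : p1 = i
    · by_cases c22 : p2 = j
      · -- the swapped pair itself: same min
        subst c11; subst c22
        rw [if_neg (show p1 ≠ p2 by omega), if_pos rfl, if_pos rfl]
        rw [min_comm]
        exact base
      · -- p1 = i, p2 ∉ {i, j}: the pair becomes (h_j, h_p2)
        subst c11
        rw [if_neg c12, if_pos rfl, if_neg c22, if_neg (show p2 ≠ p1 by omega)]
        refine le_trans ?_ (dom j hj (fun e => c12 e.symm) (fun e => c22 e.symm))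
        exact le_min (le_trans (min_le_right _ _) (le_max_right _ _)) (min_le_left _ _)
    · by_cases c21 : p2 = i
      · -- p2 = i < j, j ∉ {p1, p2}: the pair becomes (h_p1, h_j)
        rw [if_neg c12, if_neg c11, if_neg (show p2 ≠ j by omega), if_pos c21]
        refine le_trans ?_ (dom j hj (fun e => c12 e.symm) (by omega))
        exact le_min (le_trans (min_le_left _ _) (le_max_left _ _)) (min_le_right _ _)
      · by_cases c22 : p2 = j
        · -- p2 = j, p1 ∉ {i, j}: the pair becomes (h_p1, h_i)
          rw [if_neg c12, if_neg c11, if_pos c22]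
          refine le_trans ?_ (dom i (by omega) (fun e => c11 e.symm) (by omega))
          exact le_min (le_trans (min_le_left _ _) (le_max_left _ _)) (min_le_right _ _)
        · -- untouched pair
          rw [if_neg c12, if_neg c11, if_neg c22, if_neg c21]
          exact base

-- a swap of any two distinct in-range positions is one A actually performs
theorem swap_real (h : List Int) (u v : Nat) (hu : u < h.length) (hv : v < h.length)
    (huv : u ≠ v) :
    ∃ q, q ∈ pairList h.length ∧ pySwap h q.1 q.2 = pySwap h u v := by
  rcases Nat.lt_or_ge u v with hlt | hge
  · exact ⟨(u, v), mem_pairList.2 ⟨hlt, hv⟩, rfl⟩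
  · exact ⟨(v, u), mem_pairList.2 ⟨by omega, hu⟩, pySwap_comm h v u (by omega)⟩

theorem main_eq (h : List Int) : solve h = solve_alt h := by
  rw [solve_eq, solve_alt_eq]
  apply le_antisymm
  · refine mf_le ?_ ?_
    · rw [containerArea_eq]
      refine mf_le (le_mf _ _) ?_
      intro x hx
      rcases List.mem_map.1 hx with ⟨p, hp, rfl⟩
      rcases mem_pairList.1 hp with ⟨h1, h2⟩
      refine le_trans ?_ (mem_le_mf 0 (List.mem_map.2 ⟨p, hp, rfl⟩))
      rw [candF_eq]
      exact mul_le_mul_of_nonneg_right (base_le_candV h p) (by omega)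
    · intro x hx
      rcases List.mem_map.1 hx with ⟨q, hq, rfl⟩
      rcases mem_pairList.1 hq with ⟨hq1, hq2⟩
      rw [containerArea_eq, pySwap_length]
      refine mf_le (le_mf _ _) ?_
      intro x hx
      rcases List.mem_map.1 hx with ⟨p, hp, rfl⟩
      rcases mem_pairList.1 hp with ⟨h1, h2⟩
      refine le_trans ?_ (mem_le_mf 0 (List.mem_map.2 ⟨p, hp, rfl⟩))
      rw [candF_eq]
      have hmin : min ((pySwap h q.1 q.2).getD p.1 0) ((pySwap h q.1 q.2).getD p.2 0)
          ≤ candV h p := by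
        have := swap_min_le_candV h q.1 q.2 p.1 p.2 hq1 hq2 h1 h2
        simpa using this
      calc ar (pySwap h q.1 q.2) p
          = min ((pySwap h q.1 q.2).getD p.1 0) ((pySwap h q.1 q.2).getD p.2 0)
            * ((p.2 : Int) - (p.1 : Int)) := rfl
        _ ≤ candV h p * ((p.2 : Int) - (p.1 : Int)) :=
            mul_le_mul_of_nonneg_right hmin (by omega)
  · refine mf_le ?_ ?_
    · calc (0 : Int) ≤ containerArea h := by
            rw [containerArea_eq]; exact le_mf _ _
        _ ≤ mf (containerArea h) _ := le_mf _ _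
    · intro x hx
      rcases List.mem_map.1 hx with ⟨p, hp, rfl⟩
      rcases mem_pairList.1 hp with ⟨h1, h2⟩
      rw [candF_eq]
      have har_le : ar h p ≤ mf (containerArea h)
          ((pairList h.length).map (fun q => containerArea (pySwap h q.1 q.2))) := by
        refine le_trans ?_ (le_mf _ _)
        rw [containerArea_eq]
        exact mem_le_mf 0 (List.mem_map.2 ⟨p, hp, rfl⟩)
      rcases candV_cases h p (by omega) with hc | ⟨mm, hmm, hmi, hmj, hc⟩
      · rw [hc]
        exact har_le
      · rw [hc, max_mul_of_nonneg _ _ (show (0:Int) ≤ (p.2 : Int) - (p.1 : Int) by omega)]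
        apply max_le
        · exact har_le
        · -- realize the candidate: swap the shorter wall of the pair with mm
          by_cases hcmp : h.getD p.1 0 ≤ h.getD p.2 0
          · obtain ⟨q, hqmem, hqeq⟩ := swap_real h p.1 mm (by omega) hmm (fun e => hmi e.symm)
            have e1 := getD_pySwap h p.1 mm p.1 (by omega) hmm (fun e => hmi e.symm) (by omega)
            have e2 := getD_pySwap h p.1 mm p.2 (by omega) hmm (fun e => hmi e.symm) h2
            rw [if_neg (fun e => hmi e.symm), if_pos rfl] at e1
            rw [if_neg (fun e => hmj e.symm), if_neg (show p.2 ≠ p.1 by omega)] at e2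
            calc min (max (h.getD p.1 0) (h.getD p.2 0)) (h.getD mm 0) * ((p.2 : Int) - (p.1 : Int))
                = ar (pySwap h p.1 mm) p := by
                  unfold ar; rw [e1, e2, max_eq_right hcmp, min_comm]
              _ = ar (pySwap h q.1 q.2) p := by rw [hqeq]
              _ ≤ containerArea (pySwap h q.1 q.2) := by
                  rw [containerArea_eq, pySwap_length]
                  exact mem_le_mf 0 (List.mem_map.2 ⟨p, hp, rfl⟩)
              _ ≤ _ := mem_le_mf (containerArea h) (List.mem_map.2 ⟨q, hqmem, rfl⟩)
          · obtain ⟨q, hqmem, hqeq⟩ := swap_real h p.2 mm h2 hmm (fun e => hmj e.symm)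
            have e1 := getD_pySwap h p.2 mm p.1 h2 hmm (fun e => hmj e.symm) (by omega)
            have e2 := getD_pySwap h p.2 mm p.2 h2 hmm (fun e => hmj e.symm) h2
            rw [if_neg (fun e => hmi e.symm), if_neg (show p.1 ≠ p.2 by omega)] at e1
            rw [if_neg (fun e => hmj e.symm), if_pos rfl] at e2
            calc min (max (h.getD p.1 0) (h.getD p.2 0)) (h.getD mm 0) * ((p.2 : Int) - (p.1 : Int))
                = ar (pySwap h p.2 mm) p := by
                  unfold ar; rw [e1, e2, max_eq_left (by omega)]
              _ = ar (pySwap h q.1 q.2) p := by rw [hqeq]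
              _ ≤ containerArea (pySwap h q.1 q.2) := by
                  rw [containerArea_eq, pySwap_length]
                  exact mem_le_mf 0 (List.mem_map.2 ⟨p, hp, rfl⟩)
              _ ≤ _ := mem_le_mf (containerArea h) (List.mem_map.2 ⟨q, hqmem, rfl⟩)

-- ===== VERDICT (by name: the statement is the Claim_ definition above) =====
theorem solve_spec : Claim_equal_solve := by
  intro height _
  unfold Spec_solve
  exact main_eq height
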